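-- pv_equiv track=rewrite | github.com/KaisBu/my_works | Module20/09_competition_protocol/main.py | sorted_function
-- ===== SOURCE A (Python) =====
-- def sorted_function(dictionary):
--     max_record = 0
--     names_of_winners = []
--     records_of_winners = []
--
--     for name, tuple_records in dictionary.items():
--         if tuple_records[0] <= max_record:
--             is_in = False
--
--             for index, record in enumerate(records_of_winners):
--                 if record < tuple_records[0]:
--                     records_of_winners.insert(index, tuple_records[0])
--                     names_of_winners.insert(index, name)
--                     is_in = True
--                     break
--                 elif record == tuple_records[0]:
--                     if tuple_records[1] < dictionary[names_of_winners[index]][1]: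
--                         records_of_winners.insert(index, tuple_records[0])
--                         names_of_winners.insert(index, name)
--                         is_in = True
--                         break
--
--             if not is_in:
--                 records_of_winners.append(tuple_records[0])
--                 names_of_winners.append(name)
--
--         else:
--             names_of_winners.insert(0, name)
--             records_of_winners.insert(0, tuple_records[0])
--             max_record = tuple_records[0]
--
--     return zip(names_of_winners[:3], records_of_winners[:3])
-- ===== SOURCE B (Python) =====
-- def sorted_function(dictionary):
--     top = sorted(dictionary.items(), key=lambda kv: (-kv[1][0], kv[1][1]))[:3]
--     return zip((n for n, _ in top), (r for _, (r, _) in top))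
-- ===== Notes on version B (the rewrite author's own statement) =====
-- stated objective: faster
-- what changed: A hand-maintains two parallel ranking lists with a nested insertion scan and a dict lookup for tie-breaks (an O(n^2) insertion sort); B sorts the items once with key (-record, runnerup) (stable sort = A's insertion-order tie rule) and slices the first three.
import Mathlib
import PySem

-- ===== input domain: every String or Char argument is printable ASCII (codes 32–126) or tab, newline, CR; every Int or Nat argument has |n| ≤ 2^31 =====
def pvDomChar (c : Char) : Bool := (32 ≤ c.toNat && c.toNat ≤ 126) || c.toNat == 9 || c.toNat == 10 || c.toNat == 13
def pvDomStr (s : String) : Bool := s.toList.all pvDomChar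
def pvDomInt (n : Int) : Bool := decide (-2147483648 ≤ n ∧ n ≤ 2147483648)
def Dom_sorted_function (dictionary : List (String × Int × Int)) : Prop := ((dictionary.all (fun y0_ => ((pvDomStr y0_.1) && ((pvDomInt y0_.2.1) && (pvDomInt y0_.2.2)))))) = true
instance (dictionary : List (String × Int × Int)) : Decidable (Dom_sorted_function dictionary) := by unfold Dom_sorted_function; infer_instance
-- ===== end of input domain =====

-- B replaces A's hand-maintained parallel ranking lists (nested insertion scan + dict lookup
-- for tie-breaks) by one stable sort with key (-record, runnerup) sliced to 3 (faster: one O(n log n) sort instead of A's quadratic insertion scans).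

-- ===== PORT A =====

-- dictionary[name]: first match; the default (0, 0) is unreachable (looked-up names come from the dict)
def aLookup (d : List (String × Int × Int)) (k : String) : Int × Int :=
  match d with
  | [] => (0, 0)
  | (n, v) :: t => if n = k then v else aLookup t k

-- the inner 'for index, record in enumerate(records_of_winners)' scan: returns the insertion
-- index (break) or none (loop falls through, is_in stays False); names are walked in lockstep
def aFind (d : List (String × Int × Int)) (r s : Int) :
    List Int → List String → Option Nat
  | [], _ => none
  | _ :: _, [] => none  -- unreachable: both lists always have equal length
  | rec_ :: recs, nm :: nms =>
    if rec_ < r then some 0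
    else if rec_ = r then
      if s < (aLookup d nm).2 then some 0
      else (aFind d r s recs nms).map (· + 1)
    else (aFind d r s recs nms).map (· + 1)

-- one iteration of the outer loop; state = (max_record, names_of_winners, records_of_winners)
def aStep (d : List (String × Int × Int)) (st : Int × List String × List Int)
    (item : String × Int × Int) : Int × List String × List Int :=
  let (mx, nms, recs) := st
  let (name, tr) := item
  if tr.1 ≤ mx then
    match aFind d tr.1 tr.2 recs nms with
    | some i => (mx, nms.insertIdx i name, recs.insertIdx i tr.1)
    | none => (mx, nms ++ [name], recs ++ [tr.1])
  else (tr.1, name :: nms, tr.1 :: recs)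

def sorted_function (dictionary : List (String × Int × Int)) : List (String × Int) :=
  let st := dictionary.foldl (aStep dictionary) (0, [], [])
  (st.2.1.take 3).zip (st.2.2.take 3)

-- ===== PORT B =====
def sorted_function_alt (dictionary : List (String × Int × Int)) : List (String × Int) :=
  let top := (PySem.List.sorted2 dictionary (fun kv => -kv.2.1) (fun kv => kv.2.2)).take 3
  (top.map (fun kv => kv.1)).zip (top.map (fun kv => kv.2.1))

-- ===== PRECONDITION & SPEC =====
-- Pre_ requires pairwise-distinct keys: the Python argument is a dict, which cannot hold
-- duplicate keys, so association lists with repeated keys encode no dict input at all.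
def Pre_sorted_function (dictionary : List (String × Int × Int)) : Prop :=
  (dictionary.map Prod.fst).Nodup
instance (dictionary : List (String × Int × Int)) : Decidable (Pre_sorted_function dictionary) := by
  unfold Pre_sorted_function; infer_instance

def pvWitness_sorted_function : (List (String × Int × Int)) :=
  [("bob", (7, 2)), ("amy", (9, 1)), ("zed", (7, 1)), ("kim", (3, 0))]

def Spec_sorted_function (dictionary : List (String × Int × Int)) (out : List (String × Int)) : Prop := out = sorted_function_alt dictionary
instance (dictionary : List (String × Int × Int)) (out : List (String × Int)) : Decidable (Spec_sorted_function dictionary out) := by unfold Spec_sorted_function; infer_instance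

-- ===== CLAIM (what is proved, stated in full; the proofs are below) =====
def Claim_equal_sorted_function : Prop := ∀ (dictionary : List (String × Int × Int)), Dom_sorted_function dictionary → Pre_sorted_function dictionary → Spec_sorted_function dictionary (sorted_function dictionary)

-- ===== LEMMAS AND PROOFS =====

-- the comparison sorted2 uses for key (-record, runnerup)
def bef (a b : String × Int × Int) : Bool :=
  decide ((-a.2.1 : Int) < -b.2.1) || (!decide ((-b.2.1 : Int) < -a.2.1) && decide (a.2.2 < b.2.2))

theorem sorted2_eq_foldl (d : List (String × Int × Int)) :
    PySem.List.sorted2 d (fun kv => -kv.2.1) (fun kv => kv.2.2)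
      = d.foldl (fun acc x => PySem.List.insertBy bef x acc) [] := by
  rfl

theorem aLookup_of_mem (d : List (String × Int × Int)) (x : String × Int × Int)
    (hnd : (d.map Prod.fst).Nodup) (hx : x ∈ d) : aLookup d x.1 = x.2 := by
  induction d with
  | nil => cases hx
  | cons h t ih =>
    obtain ⟨n, v⟩ := h
    simp only [List.map_cons, List.nodup_cons] at hnd
    rcases List.mem_cons.mp hx with hx' | hx'
    · subst hx'; simp [aLookup]
    · have hne : n ≠ x.1 := by
        intro he
        exact hnd.1 (he ▸ (List.mem_map.mpr ⟨x, hx', rfl⟩))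
      simpa [aLookup, hne] using ih hnd.2 hx' 

theorem aFind_spec (d : List (String × Int × Int)) (name : String) (r s : Int)
    (S : List (String × Int × Int)) (hS : ∀ x ∈ S, aLookup d x.1 = x.2) :
    (match aFind d r s (S.map (fun x => x.2.1)) (S.map (fun x => x.1)) with
     | some i => ((S.map (fun x => x.1)).insertIdx i name, (S.map (fun x => x.2.1)).insertIdx i r)
     | none => (S.map (fun x => x.1) ++ [name], S.map (fun x => x.2.1) ++ [r]))
    = ((PySem.List.insertBy bef (name, r, s) S).map (fun x => x.1),
       (PySem.List.insertBy bef (name, r, s) S).map (fun x => x.2.1)) := by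
  induction S with
  | nil => simp [aFind, PySem.List.insertBy]
  | cons y ys ih =>
    have hy : aLookup d y.1 = y.2 := hS y (by simp)
    have hS' : ∀ x ∈ ys, aLookup d x.1 = x.2 := fun x hx => hS x (List.mem_cons_of_mem _ hx)
    have ih' := ih hS'
    by_cases h1 : y.2.1 < r
    · have hb : bef (name, r, s) y = true := by simp only [bef]; simp; omega
      simp [aFind, h1, PySem.List.insertBy, hb]
    · by_cases h2 : y.2.1 = r
      · by_cases h3 : s < y.2.2
        · have hb : bef (name, r, s) y = true := by simp only [bef]; simp; omega
          simp [aFind, h2, hy, h3, PySem.List.insertBy, hb]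
        · have hb : bef (name, r, s) y = false := by simp only [bef]; simp; omega
          cases haF : aFind d r s (ys.map fun x => x.2.1) (ys.map fun x => x.1) with
          | none =>
            rw [haF] at ih'
            simp only [Prod.mk.injEq] at ih'
            simp [aFind, h2, hy, h3, PySem.List.insertBy, hb, haF, ih'.1, ih'.2]
          | some i =>
            rw [haF] at ih'
            simp only [Prod.mk.injEq] at ih'
            simp [aFind, h2, hy, h3, PySem.List.insertBy, hb, haF,
                  List.insertIdx_succ_cons, ih'.1, ih'.2]
      · have h4 : r < y.2.1 := by omega
        have hb : bef (name, r, s) y = false := by simp only [bef]; simp; omega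
        cases haF : aFind d r s (ys.map fun x => x.2.1) (ys.map fun x => x.1) with
        | none =>
          rw [haF] at ih'
          simp only [Prod.mk.injEq] at ih'
          simp [aFind, h1, h2, PySem.List.insertBy, hb, haF, ih'.1, ih'.2]
        | some i =>
          rw [haF] at ih'
          simp only [Prod.mk.injEq] at ih'
          simp [aFind, h1, h2, PySem.List.insertBy, hb, haF,
                List.insertIdx_succ_cons, ih'.1, ih'.2]

theorem fold_inv (d : List (String × Int × Int)) (hnd : (d.map Prod.fst).Nodup) :
    ∀ (t : List (String × Int × Int)) (S : List (String × Int × Int)) (mx : Int),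
      (∀ x ∈ t, x ∈ d) → (∀ x ∈ S, x ∈ d) → (∀ x ∈ S, x.2.1 ≤ mx) → 0 ≤ mx →
      ∃ mx' : Int,
        t.foldl (aStep d) (mx, S.map (fun x => x.1), S.map (fun x => x.2.1))
          = (mx', (t.foldl (fun acc x => PySem.List.insertBy bef x acc) S).map (fun x => x.1),
                  (t.foldl (fun acc x => PySem.List.insertBy bef x acc) S).map (fun x => x.2.1)) := by
  intro t
  induction t with
  | nil => intro S mx _ _ _ _; exact ⟨mx, rfl⟩
  | cons it rest ih =>
    intro S mx ht hSd hle h0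
    obtain ⟨name, r, s⟩ := it
    have hmem : (name, r, s) ∈ d := ht _ (by simp)
    have hrest : ∀ x ∈ rest, x ∈ d := fun x hx => ht x (List.mem_cons_of_mem _ hx)
    by_cases hr : r ≤ mx
    · have hS : ∀ x ∈ S, aLookup d x.1 = x.2 := fun x hx => aLookup_of_mem d x hnd (hSd x hx)
      have hfs := aFind_spec d name r s S hS
      have hstep : aStep d (mx, S.map (fun x => x.1), S.map (fun x => x.2.1)) (name, r, s)
          = (mx, (PySem.List.insertBy bef (name, r, s) S).map (fun x => x.1),
                 (PySem.List.insertBy bef (name, r, s) S).map (fun x => x.2.1)) := by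
        cases haF : aFind d r s (S.map fun x => x.2.1) (S.map fun x => x.1) with
        | none =>
          rw [haF] at hfs
          simp only [Prod.mk.injEq] at hfs
          simp [aStep, hr, haF, hfs.1, hfs.2]
        | some i =>
          rw [haF] at hfs
          simp only [Prod.mk.injEq] at hfs
          simp [aStep, hr, haF, hfs.1, hfs.2]
      rw [List.foldl_cons, hstep]
      refine ih (PySem.List.insertBy bef (name, r, s) S) mx hrest ?_ ?_ h0
      · intro x hx
        rcases (PySem.List.insertBy_mem_iff bef _ x S).mp hx with h | h
        · exact h ▸ hmem
        · exact hSd x h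
      · intro x hx
        rcases (PySem.List.insertBy_mem_iff bef _ x S).mp hx with h | h
        · subst h; exact hr
        · exact hle x h
    · have hins : PySem.List.insertBy bef (name, r, s) S = (name, r, s) :: S := by
        cases S with
        | nil => simp [PySem.List.insertBy]
        | cons y ys =>
          have hy : y.2.1 ≤ mx := hle y (by simp)
          have hb : bef (name, r, s) y = true := by simp only [bef]; simp; omega
          simp [PySem.List.insertBy, hb]
      have hstep : aStep d (mx, S.map (fun x => x.1), S.map (fun x => x.2.1)) (name, r, s)
          = (r, ((name, r, s) :: S).map (fun x => x.1), ((name, r, s) :: S).map (fun x => x.2.1)) := by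
        simp [aStep, hr]
      rw [List.foldl_cons, hstep, ← hins]
      refine ih (PySem.List.insertBy bef (name, r, s) S) r hrest ?_ ?_ (by omega)
      · intro x hx
        rcases (PySem.List.insertBy_mem_iff bef _ x S).mp hx with h | h
        · exact h ▸ hmem
        · exact hSd x h
      · intro x hx
        rcases (PySem.List.insertBy_mem_iff bef _ x S).mp hx with h | h
        · subst h; exact le_rfl
        · have := hle x h; omega

-- ===== VERDICT (by name: the statement is the Claim_ definition above) =====
theorem sorted_function_spec : Claim_equal_sorted_function := by
  intro d _ hpre
  unfold Spec_sorted_function sorted_function sorted_function_alt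
  obtain ⟨mx', heq⟩ := fold_inv d hpre d [] 0 (fun x hx => hx) (by simp) (by simp) le_rfl
  simp only [List.map_nil] at heq
  rw [heq, sorted2_eq_foldl]
  simp [List.map_take]
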